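-- pv_equiv track=rewrite | github.com/EfazAhmed/CodeSignal-Arcade | The Core/6_weak_numbers.py/45_square_digits_sequence.py | solution
-- ===== SOURCE A (Python) =====
-- def solution(a0):
--     memory = [a0]
--
--     while True:
--         a0 = transform(a0)
--         if a0 in memory:
--             memory.append(a0)
--             return len(memory)
--         if a0 not in memory:
--             memory.append(a0)
--
-- def transform(num):
--     return sum([int(pow(int(x),2)) for x in str(num)])
-- ===== SOURCE B (Python) =====
-- def transform(num):
--     return sum([int(pow(int(x),2)) for x in str(num)])
--
-- def solution(a0):
--     # Floyd's cycle detection: no memory list at all, O(1) space.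
--     # The answer is mu + lam + 1: A's memory holds x_0..x_{mu+lam-1} plus the
--     # repeated element appended on detection.
--     tortoise = transform(a0)
--     hare = transform(transform(a0))
--     while tortoise != hare:
--         tortoise = transform(tortoise)
--         hare = transform(transform(hare))
--     # find cycle start index mu
--     mu = 0
--     tortoise = a0
--     while tortoise != hare:
--         tortoise = transform(tortoise)
--         hare = transform(hare)
--         mu += 1
--     # measure cycle length lam
--     lam = 1
--     hare = transform(tortoise)
--     while hare != tortoise:
--         hare = transform(hare)
--         lam += 1
--     return mu + lam + 1
-- ===== Notes on version B (the rewrite author's own statement) =====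
-- stated objective: alternative
-- what changed: A's growing memory list with O(n) membership scans is replaced by Floyd's tortoise-and-hare cycle detection on the transform map (meet, then find the cycle start mu and the cycle length lam, return mu+lam+1), using O(1) space and no stored sequence.
import Mathlib
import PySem

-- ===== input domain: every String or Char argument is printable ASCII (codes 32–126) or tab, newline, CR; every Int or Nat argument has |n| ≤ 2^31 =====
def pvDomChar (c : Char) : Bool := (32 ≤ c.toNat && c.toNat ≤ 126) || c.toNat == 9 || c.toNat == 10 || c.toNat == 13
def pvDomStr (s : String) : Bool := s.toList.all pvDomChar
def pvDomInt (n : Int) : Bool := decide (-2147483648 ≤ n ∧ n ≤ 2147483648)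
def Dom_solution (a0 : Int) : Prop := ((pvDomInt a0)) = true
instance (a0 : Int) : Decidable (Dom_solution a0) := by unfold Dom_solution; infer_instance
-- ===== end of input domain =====

-- B replaces A's growing memory list (scanned with 'in' each step) by Floyd's
-- tortoise-and-hare cycle detection over the transform map, returning mu + lam + 1
-- with O(1) space; a genuinely different algorithm for the same count.


-- ===== PORT A =====
-- transform(num) = sum of squares of the decimal digits of str(num).
-- int(x) on a non-digit char raises ValueError in Python; `.getD 0` is a totality
-- guard, unreachable for the nonnegative inputs admitted by Pre_solution.
def transformL (num : Int) : Int :=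
  ((PySem.Int.toStr num).toList.map
    (fun x => ((PySem.Int.ofStr? (String.ofList [x])).getD 0) ^ 2)).sum

-- the `while True` loop of A; fuel is only a totality guard (never exhausted on admitted inputs)
def solLoopA (fuel : Nat) (a0 : Int) (memory : List Int) : Int :=
  match fuel with
  | 0 => 0
  | n + 1 =>
    let a0' := transformL a0
    if a0' ∈ memory then ((memory ++ [a0']).length : Int)
    else solLoopA n a0' (if a0' ∉ memory then memory ++ [a0'] else memory)

def pvFuel : Nat := 1000000

def solution (a0 : Int) : Int := solLoopA pvFuel a0 [a0]

-- ===== PORT B =====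
-- Floyd phase 1: advance tortoise by one and hare by two transforms until they meet;
-- returns the hare's value at the meeting point. Fuel is a totality guard only.
def floydMeet (fuel : Nat) (t h : Int) : Int :=
  match fuel with
  | 0 => h
  | n + 1 => if t = h then h else floydMeet n (transformL t) (transformL (transformL h))

-- Floyd phase 2: step both pointers once until they meet, counting steps;
-- returns (mu, value at the cycle start).
def floydMu (fuel : Nat) (t h : Int) (mu : Int) : Int × Int :=
  match fuel with
  | 0 => (mu, t)
  | n + 1 => if t = h then (mu, t) else floydMu n (transformL t) (transformL h) (mu + 1)

-- Floyd phase 3: walk the hare around the cycle back to the tortoise, counting.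
def floydLam (fuel : Nat) (t h : Int) (lam : Int) : Int :=
  match fuel with
  | 0 => lam
  | n + 1 => if h = t then lam else floydLam n t (transformL h) (lam + 1)

def solution_alt (a0 : Int) : Int :=
  let meet := floydMeet pvFuel (transformL a0) (transformL (transformL a0))
  let p := floydMu pvFuel a0 meet 0
  let lam := floydLam pvFuel p.2 (transformL p.2) 1
  p.1 + lam + 1

-- ===== PRECONDITION & SPEC =====
-- Pre_ excludes negative inputs, on which Python's int() of the minus sign inside
-- transform raises ValueError (both A and B raise there).
def Pre_solution (a0 : Int) : Prop := 0 ≤ a0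
instance (a0 : Int) : Decidable (Pre_solution a0) := by unfold Pre_solution; infer_instance
def pvWitness_solution : Int := (19)

def Spec_solution (a0 : Int) (out : Int) : Prop := out = solution_alt a0
instance (a0 : Int) (out : Int) : Decidable (Spec_solution a0 out) := by unfold Spec_solution; infer_instance

-- ===== CLAIM (what is proved, stated in full; the proofs are below) =====
def Claim_equal_solution : Prop := ∀ (a0 : Int), Dom_solution a0 → Pre_solution a0 → Spec_solution a0 (solution a0)

-- ===== LEMMAS AND PROOFS =====

-- every term of the digit-square sum is a square, so transform is nonnegative
lemma transformL_nonneg (num : Int) : 0 ≤ transformL num := by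
  apply List.sum_nonneg
  intro x hx
  simp only [List.mem_map] at hx
  obtain ⟨c, _, rfl⟩ := hx
  positivity

-- every character produced by Nat.toDigitsCore is either from the seed list or a digit char
lemma mem_toDigitsCore (f : Nat) : ∀ (n : Nat) (l : List Char) (c : Char),
    c ∈ Nat.toDigitsCore 10 f n l → c ∈ l ∨ ∃ d : Nat, d < 10 ∧ c = Nat.digitChar d := by
  induction f with
  | zero => intro n l c hc; exact Or.inl hc
  | succ f ih =>
    intro n l c hc
    simp only [Nat.toDigitsCore] at hc
    split at hc
    · rcases List.mem_cons.mp hc with h | h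
      · exact Or.inr ⟨n % 10, Nat.mod_lt _ (by norm_num), h⟩
      · exact Or.inl h
    · rcases ih (n / 10) _ c hc with h | h
      · rcases List.mem_cons.mp h with h' | h'
        · exact Or.inr ⟨n % 10, Nat.mod_lt _ (by norm_num), h'⟩
        · exact Or.inl h'
      · exact Or.inr h

-- the square of a single decimal digit's int() value is at most 81
lemma digit_term_le (d : Nat) (hd : d < 10) :
    ((PySem.Int.ofStr? (String.ofList [Nat.digitChar d])).getD 0) ^ 2 ≤ 81 := by
  interval_cases d <;> decide

-- bound on transform: a nonnegative input below 10^10 has at most 10 digits,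
-- each contributing at most 81
lemma transformL_le (v : Int) (h0 : 0 ≤ v) (hv : v ≤ 2147483648) : transformL v ≤ 810 := by
  unfold transformL
  have hts : (PySem.Int.toStr v).toList = Nat.toDigits 10 v.toNat := by
    simp [PySem.Int.toStr, PySem.Int.toChars, not_lt.mpr h0, String.toList_ofList]
  rw [hts]
  have hlen : (Nat.toDigits 10 v.toNat).length ≤ 10 := by
    apply Nat.toDigits_length 10 v.toNat 10 (by norm_num)
    have : v.toNat ≤ 2147483648 := by omega
    calc v.toNat ≤ 2147483648 := this
      _ < 10 ^ 10 := by norm_num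
  have hbound : ∀ y ∈ (Nat.toDigits 10 v.toNat).map
      (fun x => ((PySem.Int.ofStr? (String.ofList [x])).getD 0) ^ 2), y ≤ 81 := by
    intro y hy
    simp only [List.mem_map] at hy
    obtain ⟨c, hc, rfl⟩ := hy
    rcases mem_toDigitsCore _ _ _ _ hc with h | ⟨d, hd, rfl⟩
    · simp at h
    · exact digit_term_le d hd
  calc ((Nat.toDigits 10 v.toNat).map
        (fun x => ((PySem.Int.ofStr? (String.ofList [x])).getD 0) ^ 2)).sum
      ≤ (((Nat.toDigits 10 v.toNat).map
        (fun x => ((PySem.Int.ofStr? (String.ofList [x])).getD 0) ^ 2)).length : ℕ) • (81 : ℤ) :=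
        List.sum_le_card_nsmul _ 81 hbound
    _ = (((Nat.toDigits 10 v.toNat).length : ℕ) : ℤ) * 81 := by
        simp
    _ ≤ 10 * 81 := by
        have : ((Nat.toDigits 10 v.toNat).length : ℤ) ≤ 10 := by exact_mod_cast hlen
        nlinarith
    _ = 810 := by norm_num

-- ===== VERDICT (by name: the statement is the Claim_ definition above) =====
theorem solution_spec : Claim_equal_solution := by
  classical
  intro a0 hdom hpre
  unfold Spec_solution
  have hx0 : (0:Int) ≤ a0 := hpre
  have hdom' : a0 ≤ 2147483648 := by
    unfold Dom_solution pvDomInt at hdom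
    have := of_decide_eq_true hdom
    omega
  -- the orbit of a0 under transform, abstracted by its two defining equations
  obtain ⟨x, x0, xsucc⟩ :
      ∃ x : Nat → Int, x 0 = a0 ∧ ∀ k, x (k+1) = transformL (x k) :=
    ⟨fun k => transformL^[k] a0, rfl, fun k => Function.iterate_succ_apply' transformL k a0⟩
  -- all values from x 1 on lie in [0, 810]
  have xb : ∀ k : Nat, 0 ≤ x (k+1) ∧ x (k+1) ≤ 810 := by
    intro k
    induction k with
    | zero =>
      rw [xsucc 0, x0]
      exact ⟨transformL_nonneg a0, transformL_le a0 hx0 hdom'⟩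
    | succ n ih =>
      rw [xsucc (n+1)]
      exact ⟨transformL_nonneg _, transformL_le _ ih.1 (ih.2.trans (by norm_num))⟩
  -- pigeonhole: a repeat occurs among x 1 .. x 812
  obtain ⟨k0, hk0le, j0, hj0, hj0eq⟩ :
      ∃ k ≤ 812, ∃ j < k, x j = x k := by
    have hmap : ∀ i ∈ Finset.range 812, (x (i+1)).toNat ∈ Finset.range 811 := by
      intro i _
      simp only [Finset.mem_range]
      have := xb i
      omega
    obtain ⟨i, hi, j, hj, hij, heq⟩ :=
      Finset.exists_ne_map_eq_of_card_lt_of_maps_to (by simp) hmap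
    simp only [Finset.mem_range] at hi hj
    have hxe : x (i+1) = x (j+1) := by
      have h1 := (xb i).1
      have h2 := (xb j).1
      omega
    rcases lt_or_gt_of_ne hij with h | h
    · exact ⟨j+1, by omega, i+1, by omega, hxe⟩
    · exact ⟨i+1, by omega, j+1, by omega, hxe.symm⟩
  have hrep : ∃ k, ∃ j < k, x j = x k := ⟨k0, j0, hj0, hj0eq⟩
  -- r = index of the first repeat; A returns r + 1
  set r := Nat.find hrep with hrdef
  have hrle : r ≤ 812 := le_trans (Nat.find_le ⟨j0, hj0, hj0eq⟩) hk0le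
  obtain ⟨mu, hmulr, hmueq⟩ : ∃ j < r, x j = x r := Nat.find_spec hrep
  have inj : ∀ i j, i < j → j < r → x i ≠ x j := by
    intro i j hij hjr heq
    exact Nat.find_min hrep hjr ⟨i, hij, heq⟩
  set lam := r - mu with hlamdef
  have hlam1 : 1 ≤ lam := by omega
  have hmulam : mu + lam = r := by omega
  -- periodicity from index mu on
  have period0 : ∀ d, x (mu + d + lam) = x (mu + d) := by
    intro d
    induction d with
    | zero =>
      have e : mu + 0 + lam = r := by omega
      rw [e]
      exact hmueq.symm
    | succ d ih =>
      have e1 : mu + (d+1) + lam = (mu + d + lam) + 1 := by omega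
      have e2 : mu + (d+1) = (mu + d) + 1 := by omega
      rw [e1, e2, xsucc, xsucc, ih]
  have period : ∀ i, mu ≤ i → x (i + lam) = x i := by
    intro i hi
    have e : i = mu + (i - mu) := by omega
    rw [e]
    exact period0 _
  have periodN : ∀ c i, mu ≤ i → x (i + c * lam) = x i := by
    intro c
    induction c with
    | zero => simp
    | succ c ih =>
      intro i hi
      have e : i + (c+1) * lam = (i + c * lam) + lam := by ring
      rw [e, period _ (by omega), ih i hi]
  have eq_of_div : ∀ i d, mu ≤ i → lam ∣ d → x (i + d) = x i := by
    rintro i d hi ⟨c, rfl⟩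
    have e : i + lam * c = i + c * lam := by ring
    rw [e]
    exact periodN c i hi
  have hmodlt : ∀ i : Nat, (i - mu) % lam < lam := fun i => Nat.mod_lt _ (by omega)
  have norm : ∀ i, mu ≤ i → x i = x (mu + (i - mu) % lam) := by
    intro i hi
    have h := Nat.mod_add_div (i - mu) lam
    have e : i = (mu + (i - mu) % lam) + ((i - mu) / lam) * lam := by
      have e2 : lam * ((i - mu) / lam) = ((i - mu) / lam) * lam := by ring
      omega
    calc x i = x ((mu + (i - mu) % lam) + ((i - mu) / lam) * lam) := by rw [← e]
      _ = x (mu + (i - mu) % lam) := periodN _ _ (by omega)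
  have unique_before : ∀ i, i < mu → ∀ j, x j = x i → j = i := by
    intro i hi j heq
    by_contra hne
    by_cases hjr : j < r
    · rcases Nat.lt_or_ge j i with h | h
      · exact inj j i h (by omega) heq
      · exact inj i j (by omega) hjr heq.symm
    · have hjmu : mu ≤ j := by omega
      have hn := norm j hjmu
      have hidx : mu + (j - mu) % lam < r := by have := hmodlt j; omega
      exact inj i (mu + (j - mu) % lam) (by omega) hidx (heq.symm.trans hn)
  have div_of_eq : ∀ i d, mu ≤ i → x (i + d) = x i → lam ∣ d := by
    intro i d hi heq
    have h1 := norm i hi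
    have h2 := norm (i + d) (by omega)
    have hxx : x (mu + ((i + d) - mu) % lam) = x (mu + (i - mu) % lam) := by
      rw [← h2, ← h1, heq]
    have hi1 : mu + ((i + d) - mu) % lam < r := by have := hmodlt (i + d); omega
    have hi2 : mu + (i - mu) % lam < r := by have := hmodlt i; omega
    have hidx : mu + ((i + d) - mu) % lam = mu + (i - mu) % lam := by
      by_contra hne
      rcases Nat.lt_or_ge (mu + ((i + d) - mu) % lam) (mu + (i - mu) % lam) with h | h
      · exact inj _ _ h hi2 hxx
      · exact inj _ _ (by omega) hi1 hxx.symm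
    have e : (i + d) - mu = (i - mu) + d := by omega
    rw [e] at hidx
    have hmm : ((i - mu) + d) % lam = (i - mu) % lam := by omega
    have hme : Nat.ModEq lam (i - mu) ((i - mu) + d) := hmm.symm
    have := (Nat.modEq_iff_dvd' (Nat.le_add_right _ _)).mp hme
    simpa using this
  -- Floyd phase 1: the meeting index m
  have hM : ∃ k, 1 ≤ k ∧ x k = x (2 * k) := by
    refine ⟨lam * (mu + 1), Nat.one_le_iff_ne_zero.mpr (Nat.mul_ne_zero (by omega) (by omega)), ?_⟩
    have hle : mu ≤ lam * (mu + 1) := by nlinarith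
    have e : 2 * (lam * (mu + 1)) = lam * (mu + 1) + lam * (mu + 1) := by ring
    rw [e]
    exact (eq_of_div _ _ hle (dvd_mul_right lam (mu + 1))).symm
  set m := Nat.find hM with hmdef
  obtain ⟨hm1, hmeq⟩ : 1 ≤ m ∧ x m = x (2 * m) := Nat.find_spec hM
  have hmle2 : m ≤ 660156 := by
    have h1 : m ≤ lam * (mu + 1) := Nat.find_le ⟨Nat.one_le_iff_ne_zero.mpr (Nat.mul_ne_zero (by omega) (by omega)), by
      have hle : mu ≤ lam * (mu + 1) := by nlinarith
      have e : 2 * (lam * (mu + 1)) = lam * (mu + 1) + lam * (mu + 1) := by ring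
      rw [e]
      exact (eq_of_div _ _ hle (dvd_mul_right lam (mu + 1))).symm⟩
    have h2 : lam * (mu + 1) ≤ 812 * 813 := by
      have : lam ≤ 812 := by omega
      have : mu + 1 ≤ 813 := by omega
      nlinarith
    omega
  have hmum : mu ≤ m := by
    by_contra h
    rw [not_le] at h
    have h2 := unique_before m h (2 * m) hmeq.symm
    omega
  have hdvdm : lam ∣ m := by
    apply div_of_eq m m hmum
    have e : m + m = 2 * m := by ring
    rw [e]
    exact hmeq.symm
  -- phase-1 simulation
  have ph1 : ∀ fuel, ∀ k, 1 ≤ k → k ≤ m → m - k < fuel →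
      floydMeet fuel (x k) (x (2 * k)) = x m := by
    intro fuel
    induction fuel with
    | zero => intro k _ _ h; omega
    | succ n ih =>
      intro k hk1 hkm hfl
      simp only [floydMeet]
      by_cases heq : x k = x (2 * k)
      · rw [if_pos heq]
        have hkm' : m ≤ k := Nat.find_le ⟨hk1, heq⟩
        have : k = m := by omega
        rw [this]
        exact hmeq.symm
      · rw [if_neg heq]
        have hkm' : k < m := by
          rcases Nat.lt_or_ge k m with h | h
          · exact h
          · exact absurd (by rw [show k = m by omega]; exact hmeq) heq
        have e1 : transformL (x k) = x (k+1) := (xsucc k).symm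
        have e2 : x (2 * (k+1)) = transformL (transformL (x (2 * k))) := by
          have e : 2 * (k+1) = (2 * k + 1) + 1 := by omega
          rw [e, xsucc, xsucc]
        rw [e1, ← e2]
        exact ih (k+1) (by omega) (by omega) (by omega)
  have hmeet : floydMeet pvFuel (transformL a0) (transformL (transformL a0)) = x m := by
    have e1 : transformL a0 = x 1 := by rw [xsucc 0, x0]
    have e2 : transformL (transformL a0) = x 2 := by rw [xsucc 1, xsucc 0, x0]
    rw [e2, e1]
    have : x 2 = x (2 * 1) := by norm_num
    rw [this]
    exact ph1 pvFuel 1 le_rfl hm1 (by unfold pvFuel; omega)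
  -- phase-2 simulation: finds mu
  have ph2 : ∀ fuel, ∀ i, i ≤ mu → mu - i < fuel →
      floydMu fuel (x i) (x (m + i)) (i : Int) = ((mu : Int), x mu) := by
    intro fuel
    induction fuel with
    | zero => intro i _ h; omega
    | succ n ih =>
      intro i himu hfl
      simp only [floydMu]
      by_cases heq : x i = x (m + i)
      · have himu' : i = mu := by
          rcases Nat.lt_or_ge i mu with h | h
          · exfalso
            have := unique_before i h (m + i) heq.symm
            omega
          · omega
        rw [if_pos heq, himu']
      · rw [if_neg heq]
        have hilt : i < mu := by
          by_contra h
          have he : i = mu := by omega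
          apply heq
          rw [he]
          have e : m + mu = mu + m := by ring
          rw [e]
          exact (eq_of_div mu m le_rfl hdvdm).symm
        have e1 : transformL (x i) = x (i+1) := (xsucc i).symm
        have e2 : x (m + (i+1)) = transformL (x (m + i)) := by
          have e : m + (i+1) = (m + i) + 1 := by omega
          rw [e, xsucc]
        have e3 : (i : Int) + 1 = ((i+1 : Nat) : Int) := by push_cast; ring
        rw [e1, ← e2, e3]
        exact ih (i+1) (by omega) (by omega)
  have hmu : floydMu pvFuel a0 (x m) 0 = ((mu : Int), x mu) := by
    have e0 : a0 = x 0 := x0.symm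
    have e1 : x m = x (m + 0) := by norm_num
    have e2 : (0 : Int) = ((0 : Nat) : Int) := by norm_num
    rw [e0, e1, e2]
    exact ph2 pvFuel 0 (Nat.zero_le _) (by unfold pvFuel; omega)
  -- phase-3 simulation: finds lam
  have ph3 : ∀ fuel, ∀ j, 1 ≤ j → j ≤ lam → lam - j < fuel →
      floydLam fuel (x mu) (x (mu + j)) (j : Int) = (lam : Int) := by
    intro fuel
    induction fuel with
    | zero => intro j _ _ h; omega
    | succ n ih =>
      intro j hj1 hjlam hfl
      simp only [floydLam]
      by_cases heq : x (mu + j) = x mu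
      · rw [if_pos heq]
        have hdvd : lam ∣ j := div_of_eq mu j le_rfl heq
        have : lam ≤ j := Nat.le_of_dvd (by omega) hdvd
        have : j = lam := by omega
        exact_mod_cast congrArg (fun t : Nat => (t : Int)) this
      · rw [if_neg heq]
        have hjlt : j < lam := by
          by_contra h
          have he : j = lam := by omega
          apply heq
          rw [he]
          exact period mu le_rfl
        have e1 : x (mu + (j+1)) = transformL (x (mu + j)) := by
          have e : mu + (j+1) = (mu + j) + 1 := by omega
          rw [e, xsucc]
        have e3 : (j : Int) + 1 = ((j+1 : Nat) : Int) := by push_cast; ring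
        rw [← e1, e3]
        exact ih (j+1) (by omega) (by omega) (by omega)
  have hlamv : floydLam pvFuel (x mu) (transformL (x mu)) 1 = (lam : Int) := by
    have e1 : transformL (x mu) = x (mu + 1) := (xsucc mu).symm
    have e2 : (1 : Int) = ((1 : Nat) : Int) := by norm_num
    rw [e1, e2]
    exact ph3 pvFuel 1 le_rfl hlam1 (by unfold pvFuel; omega)
  -- B returns mu + lam + 1
  have hB : solution_alt a0 = (mu : Int) + (lam : Int) + 1 := by
    unfold solution_alt
    simp only [hmeet, hmu, hlamv]
  -- A returns r + 1
  have loopA : ∀ fuel, ∀ n, n < r → r - n ≤ fuel →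
      solLoopA fuel (x n) ((List.range (n+1)).map x) = ((r : Int) + 1) := by
    intro fuel
    induction fuel with
    | zero => intro nn h1 h2; omega
    | succ fl ih =>
      intro nn hnr hfl
      simp only [solLoopA]
      have ha : transformL (x nn) = x (nn+1) := (xsucc nn).symm
      rw [ha]
      have hmemiff : x (nn+1) ∈ (List.range (nn+1)).map x ↔ ∃ j < nn+1, x j = x (nn+1) := by
        simp only [List.mem_map, List.mem_range]
      by_cases hend : nn + 1 = r
      · have hm : x (nn+1) ∈ (List.range (nn+1)).map x := by
          rw [hmemiff]
          exact ⟨mu, by omega, by rw [hend]; exact hmueq⟩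
        rw [if_pos hm]
        simp only [List.length_append, List.length_map, List.length_range, List.length_cons,
          List.length_nil]
        push_cast
        omega
      · have hnm : x (nn+1) ∉ (List.range (nn+1)).map x := by
          rw [hmemiff]
          rintro ⟨j, hj, hje⟩
          exact inj j (nn+1) hj (by omega) hje
        rw [if_neg hnm, if_pos hnm]
        have e : (List.range (nn+1)).map x ++ [x (nn+1)] = (List.range (nn+2)).map x := by
          conv_rhs => rw [show nn + 2 = (nn + 1) + 1 from rfl, List.range_succ,
            List.map_append, List.map_singleton]
        rw [e]
        exact ih (nn+1) (by omega) (by omega)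
  have hr1 : 0 < r := by omega
  have hA : solution a0 = (r : Int) + 1 := by
    unfold solution
    have h0 : [a0] = (List.range 1).map x := by simp [← x0]
    have h1 : a0 = x 0 := x0.symm
    calc solLoopA pvFuel a0 [a0] = solLoopA pvFuel (x 0) ((List.range 1).map x) := by
          rw [← h0, ← h1]
      _ = (r : Int) + 1 := loopA pvFuel 0 hr1 (by unfold pvFuel; omega)
  rw [hA, hB]
  omega
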